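-- pv_equiv track=rewrite | github.com/viguardieiro/multi-rules | src/rulearena/rulebook_segments.py | _find_line_ranges
-- ===== SOURCE A (Python) =====
-- def _find_line_ranges(text: str) -> list[tuple[int, int]]:
--     """Return (start, end) character ranges for each line including its newline."""
--     ranges: list[tuple[int, int]] = []
--     start = 0
--     while start < len(text):
--         nl = text.find("\n", start)
--         if nl == -1:
--             ranges.append((start, len(text)))
--             break
--         ranges.append((start, nl + 1))
--         start = nl + 1
--     return ranges
-- ===== SOURCE B (Python) =====
-- def _find_line_ranges(text: str) -> list[tuple[int, int]]:
--     """Return (start, end) character ranges for each line including its newline."""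
--     parts = text.split("\n")
--     last = parts.pop()
--     ranges = []
--     start = 0
--     for part in parts:
--         end = start + len(part) + 1
--         ranges.append((start, end))
--         start = end
--     if last:
--         ranges.append((start, start + len(last)))
--     return ranges
-- ===== Notes on version B (the rewrite author's own statement) =====
-- stated objective: simpler
-- what changed: B splits the text on newlines once and then assigns ranges in a single offset-accumulation pass over the parts (skipping an empty final part), instead of A's while loop that repeatedly calls text.find from a moving start index.
import Mathlib
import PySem

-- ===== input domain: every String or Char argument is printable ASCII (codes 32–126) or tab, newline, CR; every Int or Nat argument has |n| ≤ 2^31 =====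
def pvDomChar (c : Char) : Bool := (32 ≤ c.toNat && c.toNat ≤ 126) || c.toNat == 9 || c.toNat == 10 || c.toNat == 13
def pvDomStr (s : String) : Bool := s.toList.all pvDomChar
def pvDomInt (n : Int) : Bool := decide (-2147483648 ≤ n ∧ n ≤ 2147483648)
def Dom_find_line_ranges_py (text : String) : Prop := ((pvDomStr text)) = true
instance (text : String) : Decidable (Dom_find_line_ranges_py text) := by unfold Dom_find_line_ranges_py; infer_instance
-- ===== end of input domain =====

-- B replaces A's repeated text.find scanning loop by one split("\n") plus a single
-- offset-accumulation pass over the parts (objective: simpler). B mutates its local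
-- list only (parts.pop()); neither program mutates the argument.

-- ===== PORT A =====
-- A's while loop: start moves to just past each newline found by text.find("\n", start).
def findLineRangesAux (cs : List Char) (start : Nat) : List (Int × Int) :=
  if h : start < cs.length then
    let nl := PySem.Chars.findFrom cs ['\n'] (start : Int)
    if h2 : nl = -1 then [((start : Int), (cs.length : Int))]
    else ((start : Int), nl + 1) :: findLineRangesAux cs (nl + 1).toNat
  else []
termination_by cs.length - start
decreasing_by
  have hs : start ≤ cs.length := Nat.le_of_lt h
  have spec := PySem.Chars.findFrom_natCast_spec cs ['\n'] start hs h2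
  have h1 : (start : Int) ≤ PySem.Chars.findFrom cs ['\n'] (start : Int) := spec.1
  have h2' := spec.2.1
  have hlen : 1 ≤ (cs.drop (PySem.Chars.findFrom cs ['\n'] (start : Int)).toNat).length := by
    have := h2'.length_le
    simpa using this
  have hlt : (PySem.Chars.findFrom cs ['\n'] (start : Int)).toNat < cs.length := by
    rw [List.length_drop] at hlen; omega
  have hge : start ≤ (PySem.Chars.findFrom cs ['\n'] (start : Int)).toNat := by
    omega
  omega

def find_line_ranges_py (text : String) : List (Int × Int) :=
  findLineRangesAux text.toList 0

-- ===== PORT B =====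
def find_line_ranges_py_alt (text : String) : List (Int × Int) :=
  let parts := PySem.Chars.splitOn text.toList ['\n']
  match PySem.List.pop? parts (-1) with
  | none => []  -- unreachable: split always returns a nonempty list
  | some (last, init) =>
    let r := init.foldl
      (fun (acc : List (Int × Int) × Int) part =>
        let e := acc.2 + (part.length : Int) + 1
        (acc.1 ++ [(acc.2, e)], e)) ([], 0)
    if last ≠ [] then r.1 ++ [(r.2, r.2 + (last.length : Int))] else r.1

-- ===== PRECONDITION & SPEC =====
def Spec_find_line_ranges_py (text : String) (out : List (Int × Int)) : Prop := out = find_line_ranges_py_alt text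
instance (text : String) (out : List (Int × Int)) : Decidable (Spec_find_line_ranges_py text out) := by unfold Spec_find_line_ranges_py; infer_instance

-- ===== CLAIM (what is proved, stated in full; the proofs are below) =====
def Claim_equal_find_line_ranges_py : Prop := ∀ (text : String), Dom_find_line_ranges_py text → Spec_find_line_ranges_py text (find_line_ranges_py text)

-- ===== LEMMAS AND PROOFS =====

-- Reference function: one structural pass, cur = chars since the current line start.
def refLine (s : Int) (cur : Nat) : List Char → List (Int × Int)
  | [] => if cur = 0 then [] else [(s, s + (cur : Int))]
  | c :: rest =>
    if c = '\n' then (s, s + (cur : Int) + 1) :: refLine (s + (cur : Int) + 1) 0 rest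
    else refLine s (cur + 1) rest

-- Index of the first newline.
def firstNl : List Char → Option Nat
  | [] => none
  | c :: rest => if c = '\n' then some 0 else (firstNl rest).map (· + 1)

-- Reference splitter matching str.split("\n").
def splitNl (pre : List Char) : List Char → List (List Char)
  | [] => [pre]
  | c :: rest => if c = '\n' then pre :: splitNl [] rest else splitNl (pre ++ [c]) rest

theorem splitNl_ne_nil (pre cs : List Char) : splitNl pre cs ≠ [] := by
  induction cs generalizing pre with
  | nil => simp [splitNl]
  | cons c rest ih =>
    simp only [splitNl]
    split
    · simp
    · exact ih _

theorem find_go_newline (cs : List Char) (k : Nat) :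
    PySem.Chars.find.go ['\n'] cs k =
      match firstNl cs with
      | none => -1
      | some j => ((k : Int) + (j : Int)) := by
  induction cs generalizing k with
  | nil => simp [PySem.Chars.find.go, firstNl]
  | cons c rest ih =>
    by_cases hc : c = '\n'
    · subst hc
      simp [PySem.Chars.find.go, firstNl, List.isPrefixOf]
    · have hpre : (['\n'].isPrefixOf (c :: rest)) = false := by
        simp [List.isPrefixOf]
        intro h; exact absurd h.symm hc
      rw [PySem.Chars.find.go]
      rw [hpre]
      simp only [firstNl, if_neg hc]
      rw [ih (k + 1)]
      cases firstNl rest with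
      | none => simp
      | some j =>
        simp only [Option.map_some]
        push_cast
        ring

theorem find_newline (cs : List Char) :
    PySem.Chars.find cs ['\n'] =
      match firstNl cs with
      | none => -1
      | some j => (j : Int) := by
  rw [PySem.Chars.find, find_go_newline]
  cases firstNl cs with
  | none => rfl
  | some j => simp

theorem firstNl_lt_length (cs : List Char) (j : Nat) (h : firstNl cs = some j) :
    j < cs.length := by
  induction cs generalizing j with
  | nil => simp [firstNl] at h
  | cons c rest ih =>
    simp only [firstNl] at h
    split at h
    · simp at h; simp; omega
    · cases hr : firstNl rest with
      | none => simp [hr] at h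
      | some j' =>
        simp [hr] at h
        have := ih j' hr
        simp; omega

-- firstNl characterizes refLine's behaviour on one whole line.
theorem refLine_firstNl (tail : List Char) (s : Int) (cur : Nat) :
    refLine s cur tail =
      match firstNl tail with
      | some j => ((s, s + (cur : Int) + (j : Int) + 1) ::
          refLine (s + (cur : Int) + (j : Int) + 1) 0 (tail.drop (j + 1)))
      | none => if cur + tail.length = 0 then [] else [(s, s + (cur : Int) + (tail.length : Int))] := by
  induction tail generalizing s cur with
  | nil => simp [refLine, firstNl]
  | cons c rest ih =>
    by_cases hc : c = '\n'
    · subst hc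
      simp [refLine, firstNl]
    · simp only [refLine, firstNl, if_neg hc]
      rw [ih s (cur + 1)]
      cases hr : firstNl rest with
      | none =>
        simp only [Option.map_none, List.length_cons]
        split_ifs <;>
          first
          | rfl
          | omega
          | (simp only [List.cons.injEq, Prod.mk.injEq, true_and, and_true]
             push_cast; ring)
      | some j =>
        simp only [Option.map_some]
        have harith : s + ((cur + 1 : Nat) : Int) + (j : Int) + 1 =
            s + (cur : Int) + ((j + 1 : Nat) : Int) + 1 := by push_cast; ring
        rw [harith, List.drop_succ_cons]

-- A's loop computes refLine from each line start.
theorem aux_eq_refLine (cs : List Char) (start : Nat) (hs : start ≤ cs.length) :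
    findLineRangesAux cs start = refLine (start : Int) 0 (cs.drop start) := by
  generalize hk : cs.length - start = k
  induction k using Nat.strong_induction_on generalizing start with
  | _ k ih =>
    rw [findLineRangesAux.eq_def]
    by_cases h : start < cs.length
    · rw [dif_pos h]
      have hfind := PySem.Chars.findFrom_natCast cs ['\n'] start hs
      rw [find_newline] at hfind
      cases hj : firstNl (cs.drop start) with
      | none =>
        have hnl : PySem.Chars.findFrom cs ['\n'] (start : Int) = -1 := by
          rw [hfind]; simp [hj]
        rw [dif_pos (by rw [hnl])]
        conv_rhs => rw [refLine_firstNl, hj]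
        have : ¬ (0 + (cs.drop start).length = 0) := by
          simp [List.length_drop]; omega
        simp only [this, if_false]
        simp [List.length_drop]
        omega
      | some j =>
        have hjlt : j < (cs.drop start).length := firstNl_lt_length _ j hj
        have hnl : PySem.Chars.findFrom cs ['\n'] (start : Int) = (start : Int) + (j : Int) := by
          rw [hfind]; simp [hj]
        have hne : ¬ (PySem.Chars.findFrom cs ['\n'] (start : Int) = -1) := by
          rw [hnl]; omega
        rw [dif_neg hne]
        rw [hnl]
        have htoNat : ((start : Int) + (j : Int) + 1).toNat = start + j + 1 := by omega
        rw [htoNat]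
        have hlen : start + j + 1 ≤ cs.length := by
          rw [List.length_drop] at hjlt; omega
        rw [ih (cs.length - (start + j + 1)) (by omega) (start + j + 1) hlen rfl]
        conv_rhs => rw [refLine_firstNl, hj]
        have hdrop : (cs.drop start).drop (j + 1) = cs.drop (start + j + 1) := by
          rw [List.drop_drop]; ring_nf
        simp only [hdrop]
        push_cast
        ring_nf
    · rw [dif_neg h]
      have : start = cs.length := by omega
      subst this
      simp [refLine, List.drop_length]

-- splitOn.go with enough fuel equals the reference splitter.
theorem splitOn_go_eq (fuel : Nat) (cs : List Char) (hfuel : cs.length < fuel)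
    (cur : List Char) (accs : List (List Char)) :
    PySem.Chars.splitOn.go ['\n'] fuel cs cur accs =
      accs.reverse ++ splitNl cur.reverse cs := by
  induction fuel generalizing cs cur accs with
  | zero => omega
  | succ f ih =>
    cases cs with
    | nil =>
      simp [PySem.Chars.splitOn.go, splitNl]
    | cons c rest =>
      by_cases hc : c = '\n'
      · subst hc
        rw [PySem.Chars.splitOn.go]
        have hpre : (['\n'].isPrefixOf ('\n' :: rest)) = true := by
          simp [List.isPrefixOf]
        rw [if_pos hpre]
        simp only [List.length_cons, List.length_nil, List.drop_succ_cons, List.drop_zero]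
        simp only [List.length_cons] at hfuel
        rw [ih rest (by omega) [] (cur.reverse :: accs)]
        simp [splitNl]
      · rw [PySem.Chars.splitOn.go]
        have hpre : (['\n'].isPrefixOf (c :: rest)) = false := by
          simp [List.isPrefixOf]
          intro h; exact absurd h.symm hc
        rw [hpre]
        simp only [Bool.false_eq_true, if_false]
        simp only [List.length_cons] at hfuel
        rw [ih rest (by omega) (c :: cur) accs]
        simp [splitNl, hc]

theorem splitOn_newline (cs : List Char) :
    PySem.Chars.splitOn cs ['\n'] = splitNl [] cs := by
  rw [PySem.Chars.splitOn]
  rw [splitOn_go_eq (cs.length + 1) cs (by omega) [] []]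
  simp

-- B's foldl, as a recursion emitting one range per part.
def emitRanges : List (List Char) → Int → List (Int × Int) × Int
  | [], s => ([], s)
  | p :: ps, s =>
    let e := s + (p.length : Int) + 1
    let r := emitRanges ps e
    ((s, e) :: r.1, r.2)

theorem foldl_emit (init : List (List Char)) (acc : List (Int × Int)) (s : Int) :
    init.foldl
      (fun (acc : List (Int × Int) × Int) part =>
        let e := acc.2 + (part.length : Int) + 1
        (acc.1 ++ [(acc.2, e)], e)) (acc, s) =
      (acc ++ (emitRanges init s).1, (emitRanges init s).2) := by
  induction init generalizing acc s with
  | nil => simp [emitRanges]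
  | cons p ps ih =>
    simp only [List.foldl_cons, emitRanges]
    rw [ih]
    simp

-- B's whole computation on a parts list (after pop).
def bCompute (last : List Char) (init : List (List Char)) (s : Int) : List (Int × Int) :=
  let r := emitRanges init s
  if last ≠ [] then r.1 ++ [(r.2, r.2 + (last.length : Int))] else r.1

theorem bCompute_cons (p : List Char) (q : List (List Char)) (last : List Char) (s : Int) :
    bCompute last (p :: q) s =
      (s, s + (p.length : Int) + 1) :: bCompute last q (s + (p.length : Int) + 1) := by
  simp only [bCompute, emitRanges]
  split <;> simp

-- Main B-side invariant: processing split parts from offset s equals refLine.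
theorem bCompute_splitNl (cs pre : List Char) (s : Int) :
    bCompute ((splitNl pre cs).getLast (splitNl_ne_nil pre cs)) ((splitNl pre cs).dropLast) s =
      refLine s pre.length cs := by
  induction cs generalizing pre s with
  | nil =>
    simp only [splitNl, List.getLast_singleton, List.dropLast_singleton]
    simp only [bCompute, emitRanges, refLine]
    by_cases hp : pre = []
    · subst hp; simp
    · have : pre.length ≠ 0 := by simpa using hp
      simp [hp, this]
  | cons c rest ih =>
    by_cases hc : c = '\n'
    · subst hc
      have hsplit : splitNl pre ('\n' :: rest) = pre :: splitNl [] rest := by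
        simp [splitNl]
      have hne := splitNl_ne_nil ([] : List Char) rest
      -- getLast and dropLast through the cons
      have hlast : (splitNl pre ('\n' :: rest)).getLast (splitNl_ne_nil pre _) =
          (splitNl [] rest).getLast hne := by
        rw [List.getLast_congr _ _ hsplit]
        exact List.getLast_cons hne
      have hdrop : (splitNl pre ('\n' :: rest)).dropLast = pre :: (splitNl [] rest).dropLast := by
        rw [hsplit]
        cases hq : splitNl [] rest with
        | nil => exact absurd hq hne
        | cons a as => simp
      rw [hlast, hdrop, bCompute_cons]
      rw [ih [] (s + (pre.length : Int) + 1)]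
      simp [refLine]
    · have hsplit : splitNl pre (c :: rest) = splitNl (pre ++ [c]) rest := by
        simp [splitNl, hc]
      have hne := splitNl_ne_nil (pre ++ [c]) rest
      have hlast : (splitNl pre (c :: rest)).getLast (splitNl_ne_nil pre _) =
          (splitNl (pre ++ [c]) rest).getLast hne := List.getLast_congr _ _ hsplit
      have hdrop : (splitNl pre (c :: rest)).dropLast = (splitNl (pre ++ [c]) rest).dropLast := by
        rw [hsplit]
      rw [hlast, hdrop, ih (pre ++ [c]) s]
      simp [refLine, hc]

theorem alt_eq_refLine (text : String) :
    find_line_ranges_py_alt text = refLine 0 0 text.toList := by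
  have hne := splitNl_ne_nil ([] : List Char) text.toList
  have hpop : PySem.List.pop? (splitNl [] text.toList) (-1) =
      some ((splitNl [] text.toList).getLast hne, (splitNl [] text.toList).dropLast) := by
    conv_lhs => rw [← List.dropLast_append_getLast hne]
    exact PySem.List.pop?_last _ _
  simp only [find_line_ranges_py_alt, splitOn_newline, hpop]
  rw [foldl_emit]
  have := bCompute_splitNl text.toList [] 0
  simp only [bCompute] at this
  simpa using this

-- ===== VERDICT (by name: the statement is the Claim_ definition above) =====
theorem find_line_ranges_py_spec : Claim_equal_find_line_ranges_py := by
  intro text _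
  unfold Spec_find_line_ranges_py
  rw [alt_eq_refLine]
  unfold find_line_ranges_py
  rw [aux_eq_refLine text.toList 0 (Nat.zero_le _)]
  simp
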